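-- pv_equiv track=rewrite | github.com/mafuba8/adventofcode | 2024/day21/day21-1.py | directional_control
-- ===== SOURCE A (Python) =====
-- arrow_keypad_shortest = {('A', '^'): ['<'], ('A', '>'): ['v'], ('A', 'v'): ['<v', 'v<'],
--                          ('A', '<'): ['<v<', 'v<<'], ('A', 'A'): [''],
--                          ('^', 'A'): ['>'], ('^', 'v'): ['v'], ('^', '>'): ['v>', '>v'],
--                          ('^', '<'): ['v<'], ('^', '^'): [''],
--                          ('<', 'v'): ['>'], ('<', '>'): ['>>'], ('<', '^'): ['>^'],
--                          ('<', 'A'): ['>>^', '>^>'], ('<', '<'): [''],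
--                          ('v', '<'): ['<'], ('v', '^'): ['^'], ('v', '>'): ['>'],
--                          ('v', 'A'): ['>^', '^>'], ('v', 'v'): [''],
--                          ('>', 'A'): ['^'], ('>', 'v'): ['<'], ('>', '^'): ['^<', '<^'],
--                          ('>', '<'): ['<<'], ('>', '>'): ['']}
--
-- def directional_control(dir_button_sequence):
--     """Returns a list of all sequences of buttons that need to be pressed in order to control a robot
--      to press the buttons given by <dir_button_sequence>."""
--     dir_button_sequence = 'A' + dir_button_sequence
--     dir_button_sequence_sequence = ['']
--     for k in range(len(dir_button_sequence) - 1):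
--         button_from = dir_button_sequence[k]
--         button_to = dir_button_sequence[k+1]
--         new_dir_button_sequence_sequence = []
--         for path in arrow_keypad_shortest[(button_from, button_to)]:
--             for s in dir_button_sequence_sequence:
--                 new_dir_button_sequence_sequence.append(s + path + 'A')
--         dir_button_sequence_sequence = new_dir_button_sequence_sequence
--     return dir_button_sequence_sequence
-- ===== SOURCE B (Python) =====
-- arrow_paths = {'A^': '<', 'A>': 'v', 'Av': '<v v<', 'A<': '<v< v<<', 'AA': '',
--                '^A': '>', '^v': 'v', '^>': 'v> >v', '^<': 'v<', '^^': '',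
--                '<v': '>', '<>': '>>', '<^': '>^', '<A': '>>^ >^>', '<<': '',
--                'v<': '<', 'v^': '^', 'v>': '>', 'vA': '>^ ^>', 'vv': '',
--                '>A': '^', '>v': '<', '>^': '^< <^', '><': '<<', '>>': ''}
--
--
-- def directional_control(dir_button_sequence):
--     """Returns a list of all sequences of buttons that need to be pressed in order to control a robot
--      to press the buttons given by <dir_button_sequence>."""
--     def presses(seq):
--         if len(seq) < 2:
--             return ['']
--         options = arrow_paths[seq[-2] + seq[-1]].split(' ')
--         heads = presses(seq[:-1])
--         return [head + path + 'A' for path in options for head in heads]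
--     return presses('A' + dir_button_sequence)
-- ===== Notes on version B (the rewrite author's own statement) =====
-- stated objective: alternative
-- what changed: A iterates forward over adjacent button pairs, multiplying a running accumulator list; B is a recursive function that peels the last button off the sequence, combining all press sequences for the prefix with the options for the final move, and stores the move table compactly as space-separated strings split on lookup. Pre_ excludes inputs with characters outside ^v<>A, on which both A and B raise KeyError.
import Mathlib
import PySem

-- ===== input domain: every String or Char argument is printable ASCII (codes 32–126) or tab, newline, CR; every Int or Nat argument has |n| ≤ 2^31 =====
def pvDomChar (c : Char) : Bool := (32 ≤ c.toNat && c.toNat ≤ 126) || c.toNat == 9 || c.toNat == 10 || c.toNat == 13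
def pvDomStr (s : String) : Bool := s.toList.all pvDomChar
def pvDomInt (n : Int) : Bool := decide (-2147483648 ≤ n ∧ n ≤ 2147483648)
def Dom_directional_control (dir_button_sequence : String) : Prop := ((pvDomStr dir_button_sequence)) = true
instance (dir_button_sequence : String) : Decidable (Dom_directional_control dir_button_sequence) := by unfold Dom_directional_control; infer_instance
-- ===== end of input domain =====

-- B replaces A's forward loop that multiplies a running accumulator by a recursion that
-- peels the last button off the sequence, with the move table stored as space-separated
-- option strings (alternative decomposition; same output, same cost).

-- ===== PORT A =====
-- the module-level dict arrow_keypad_shortest used by A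
def arrowKeypadShortest : PySem.Dict (Char × Char) (List String) :=
  PySem.Dict.ofList
    [ (('A', '^'), ["<"]), (('A', '>'), ["v"]), (('A', 'v'), ["<v", "v<"]),
      (('A', '<'), ["<v<", "v<<"]), (('A', 'A'), [""]),
      (('^', 'A'), [">"]), (('^', 'v'), ["v"]), (('^', '>'), ["v>", ">v"]),
      (('^', '<'), ["v<"]), (('^', '^'), [""]),
      (('<', 'v'), [">"]), (('<', '>'), [">>"]), (('<', '^'), [">^"]),
      (('<', 'A'), [">>^", ">^>"]), (('<', '<'), [""]),
      (('v', '<'), ["<"]), (('v', '^'), ["^"]), (('v', '>'), [">"]),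
      (('v', 'A'), [">^", "^>"]), (('v', 'v'), [""]),
      (('>', 'A'), ["^"]), (('>', 'v'), ["<"]), (('>', '^'), ["^<", "<^"]),
      (('>', '<'), ["<<"]), (('>', '>'), [""]) ]

-- dict lookup; Python raises KeyError when the key is absent (excluded by Pre_), here default []
def arrowLookup (k : Char × Char) : List String :=
  (arrowKeypadShortest.get? k).getD []

-- A's inner pair of loops: for path in options: for s in acc: new.append(s + path + 'A')
def aStep (acc : List String) (opts : List String) : List String :=
  opts.foldl (fun new path => acc.foldl (fun n s => n ++ [s ++ path ++ "A"]) new) []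

-- A's outer loop over consecutive pairs dir[k], dir[k+1] of 'A' + input
def aLoop : List String → List Char → List String
  | acc, a :: b :: rest => aLoop (aStep acc (arrowLookup (a, b))) (b :: rest)
  | acc, _ => acc

def directional_control (dir_button_sequence : String) : List String :=
  aLoop [""] (("A" ++ dir_button_sequence).toList)

-- ===== PORT B =====
-- B's module-level compact table arrow_paths (keys 'frm'+'to', values space-separated options)
def arrowPaths : PySem.Dict String String :=
  PySem.Dict.ofList
    [ ("A^", "<"), ("A>", "v"), ("Av", "<v v<"), ("A<", "<v< v<<"), ("AA", ""),
      ("^A", ">"), ("^v", "v"), ("^>", "v> >v"), ("^<", "v<"), ("^^", ""),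
      ("<v", ">"), ("<>", ">>"), ("<^", ">^"), ("<A", ">>^ >^>"), ("<<", ""),
      ("v<", "<"), ("v^", "^"), ("v>", ">"), ("vA", ">^ ^>"), ("vv", ""),
      (">A", "^"), (">v", "<"), (">^", "^< <^"), ("><", "<<"), (">>", "") ]

-- arrow_paths[frm + to].split(' '); KeyError (absent key, excluded by Pre_) defaults to [];
-- split? is always `some` since the separator ' ' is nonempty
def bOptions (src dst : Char) : List String :=
  (PySem.Str.split? ((arrowPaths.get? (String.ofList [src, dst])).getD "") " ").getD []

-- presses(seq): recursion peeling the LAST character of seq; transliterated over the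
-- REVERSED char list, so seq[-1] :: seq[-2] :: … and seq[:-1] is the tail's suffix
def bPresses : List Char → List String
  | last :: prev :: rest =>
      let options := bOptions prev last
      let heads := bPresses (prev :: rest)
      options.flatMap (fun path => heads.map (fun head => head ++ path ++ "A"))
  | _ => [""]     -- len(seq) < 2

def directional_control_alt (dir_button_sequence : String) : List String :=
  bPresses (("A" ++ dir_button_sequence).toList).reverse

-- ===== PRECONDITION & SPEC =====
-- Pre_ excludes exactly the inputs containing a character other than ^ v < > A,
-- on which the Python A raises KeyError (B raises the same KeyError there).
def Pre_directional_control (dir_button_sequence : String) : Prop :=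
  (dir_button_sequence.toList.all (fun c => c == '^' || c == 'v' || c == '<' || c == '>' || c == 'A')) = true
instance (dir_button_sequence : String) : Decidable (Pre_directional_control dir_button_sequence) := by unfold Pre_directional_control; infer_instance
def pvWitness_directional_control : String := "<^A"
def Spec_directional_control (dir_button_sequence : String) (out : List String) : Prop := out = directional_control_alt dir_button_sequence
instance (dir_button_sequence : String) (out : List String) : Decidable (Spec_directional_control dir_button_sequence out) := by unfold Spec_directional_control; infer_instance

-- ===== CLAIM (what is proved, stated in full; the proofs are below) =====
def Claim_equal_directional_control : Prop := ∀ (dir_button_sequence : String), Dom_directional_control dir_button_sequence → Pre_directional_control dir_button_sequence → Spec_directional_control dir_button_sequence (directional_control dir_button_sequence)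

-- ===== LEMMAS AND PROOFS =====

-- a character of the arrow keypad
def validChar (c : Char) : Bool := c == '^' || c == 'v' || c == '<' || c == '>' || c == 'A'

-- the two tables agree on every pair of keypad characters
theorem lookup_eq_options' {a b : Char} (ha : validChar a) (hb : validChar b) :
    arrowLookup (a, b) = bOptions a b := by
  simp only [validChar, Bool.or_eq_true, beq_iff_eq] at ha hb
  rcases ha with (((rfl | rfl) | rfl) | rfl) | rfl <;>
    rcases hb with (((rfl | rfl) | rfl) | rfl) | rfl <;> decide

-- A's step in flatMap form
theorem aStep_flatMap (acc opts : List String) :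
    aStep acc opts = opts.flatMap (fun path => acc.map (fun s => s ++ path ++ "A")) := by
  unfold aStep
  induction opts using List.reverseRecOn with
  | nil => simp
  | append_singleton l x ih =>
      rw [List.foldl_append, List.flatMap_append, ← ih, List.foldl_cons, List.foldl_nil,
        PySem.List.foldl_append_singleton_eq_map (fun s => s ++ x ++ "A") acc]
      simp

-- peeling the LAST pair off A's forward loop
theorem aLoop_snoc (c : List Char) (x : Char) (acc : List String) (h : c ≠ []) :
    aLoop acc (c ++ [x]) = aStep (aLoop acc c) (arrowLookup (c.getLast h, x)) := by
  induction c generalizing acc with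
  | nil => exact absurd rfl h
  | cons y c' ih =>
      cases c' with
      | nil => simp [aLoop]
      | cons z t =>
          show aLoop (aStep acc (arrowLookup (y, z))) ((z :: t) ++ [x]) = _
          rw [ih (aStep acc (arrowLookup (y, z))) (List.cons_ne_nil _ _)]
          rfl

-- the core equivalence, by induction from the right end of the sequence
theorem aLoop_eq_bPresses (M : List Char) : ∀ (a : Char),
    validChar a → (M.all validChar) → aLoop [""] (a :: M) = bPresses ((a :: M).reverse) := by
  induction M using List.reverseRecOn with
  | nil => intro a _ _; simp [aLoop, bPresses]
  | append_singleton N x ih =>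
      intro a ha hv
      have hvN : N.all validChar ∧ validChar x := by
        simpa [List.all_append] using hv
      have hne : (a :: N) ≠ [] := List.cons_ne_nil _ _
      rw [show a :: (N ++ [x]) = (a :: N) ++ [x] from rfl, aLoop_snoc _ _ _ hne,
        ih a ha hvN.1]
      have hlast : validChar ((a :: N).getLast hne) := by
        have := List.getLast_mem hne
        rcases List.mem_cons.mp this with h | h
        · rwa [h]
        · exact List.all_eq_true.mp hvN.1 _ h
      rw [aStep_flatMap, lookup_eq_options' hlast hvN.2]
      -- unfold bPresses on x :: (a :: N).reverse, whose head pair is (getLast, x)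
      have hdecomp : (a :: N).reverse = (a :: N).getLast hne :: (a :: N).dropLast.reverse := by
        conv_lhs => rw [← List.dropLast_append_getLast hne]
        rw [List.reverse_append]; rfl
      rw [List.reverse_append, show ([x] : List Char).reverse = [x] from rfl,
        List.singleton_append, hdecomp]
      rfl

-- ===== VERDICT (by name: the statement is the Claim_ definition above) =====
theorem directional_control_spec : Claim_equal_directional_control := by
  intro s _ hpre
  show directional_control s = directional_control_alt s
  unfold directional_control directional_control_alt
  rw [show ("A" ++ s).toList = 'A' :: s.toList by simp]
  exact aLoop_eq_bPresses s.toList 'A' rfl (by simpa [Pre_directional_control, validChar, List.all_eq_true] using hpre)
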